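-- pv_equiv track=rewrite | github.com/raymondshum/python-misc-projects | leetcode/problems/medium/1466_reorder_routes_to_make_all_paths_lead_to_city_zero.py | minReorder
-- ===== SOURCE A (Python) =====
-- from typing import List
--
-- from collections import defaultdict
--
-- def minReorder(n: int, connections: List[List[int]]) -> int:
--     """
--     Key Point: Use DFS to traverse from city 0 to all other nodes
--     and compare the path between nodes to the input.
--
--     Link: https://leetcode.com/problems/reorder-routes-to-make-all-paths-lead-to-the-city-zero/
--
--     Method: Build an adjacency map from the input. Also build
--     a set of directional edges (roads) between nodes (cities).
--     Then use DFS to visit all nodes from city 0. Compare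
--     each edge to the edges within the set. If the edge exists,
--     then the road is going in the right direction. If the
--     edge does not exist, it needs to be swapped.
--
--     Returns: Int representing the number of roads that need
--     to have their direction swapped for all roads to lead
--     city 0.
--     """
--     road_map:       Dict[List[int]]      = defaultdict(list)
--     roads:          Set[Tuple(int, int)] = set()
--     capital_city:   int                  = 0
--     visited_cities: Set[int]             = set()
--
--     # build map of initial road layout and connected cities
--     for city_1, city_2 in connections:
--         road_map[city_1].append(city_2)
--         road_map[city_2].append(city_1)
--         roads.add((city_1, city_2))
--
--     def dfs_count_swapped_roads(city: int) -> int: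
--         num_roads_to_swap: int = 0
--         visited_cities.add(city)
--         for neighbor in road_map[city]:
--             if neighbor in visited_cities:
--                 continue
--             if (neighbor, city) not in roads:
--                 num_roads_to_swap += 1
--             num_roads_to_swap += dfs_count_swapped_roads(neighbor)
--         return num_roads_to_swap
--
--     return dfs_count_swapped_roads(capital_city)
-- ===== SOURCE B (Python) =====
-- def minReorder(n, connections):
--     # iterative DFS with an explicit stack of (city, parent) pairs instead of recursion
--     road_map = {}
--     roads = set()
--     for a, b in connections:
--         road_map.setdefault(a, []).append(b)
--         road_map.setdefault(b, []).append(a)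
--         roads.add((a, b))
--     visited = {0}
--     swaps = 0
--     stack = [(x, 0) for x in reversed(road_map.get(0, []))]
--     while stack:
--         city, parent = stack.pop()
--         if city in visited:
--             continue
--         if (city, parent) not in roads:
--             swaps += 1
--         visited.add(city)
--         for x in reversed(road_map.get(city, [])):
--             stack.append((x, city))
--     return swaps
-- ===== Notes on version B (the rewrite author's own statement) =====
-- stated objective: alternative
-- what changed: A's recursive DFS with a mutated closure-captured visited set is replaced by an iterative traversal over an explicit stack of (city, parent) pairs with an accumulator, and the adjacency dict is built with setdefault instead of defaultdict.
import Mathlib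
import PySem

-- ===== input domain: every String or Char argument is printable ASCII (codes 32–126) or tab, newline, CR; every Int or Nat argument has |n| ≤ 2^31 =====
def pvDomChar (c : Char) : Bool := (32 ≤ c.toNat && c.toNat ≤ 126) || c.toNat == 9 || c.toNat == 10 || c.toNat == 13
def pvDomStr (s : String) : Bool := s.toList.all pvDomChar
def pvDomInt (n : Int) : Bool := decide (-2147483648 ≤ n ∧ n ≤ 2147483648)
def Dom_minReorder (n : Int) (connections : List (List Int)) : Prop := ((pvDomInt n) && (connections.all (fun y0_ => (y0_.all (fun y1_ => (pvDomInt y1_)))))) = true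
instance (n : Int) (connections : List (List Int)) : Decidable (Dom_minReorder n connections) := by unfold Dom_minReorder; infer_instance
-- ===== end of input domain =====

-- B replaces A's recursive DFS (mutated closure-captured visited set) by an iterative
-- explicit-stack traversal with an accumulator (objective: alternative decomposition).


-- all cities that can ever enter the visited set (0 plus every endpoint);
-- used only as a termination device (fuel bound for A, loop measure for B)
def pvUniv (connections : List (List Int)) : List Int :=
  PySem.List.dedup (0 :: connections.flatMap id)

-- two general filter-length facts, used by pvLoopB's termination proof (cited by name there)
theorem pvLenFilterLe (p q : Int → Bool) (h : ∀ a, p a = true → q a = true) :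
    ∀ l : List Int, (l.filter p).length ≤ (l.filter q).length := by
  intro l
  induction l with
  | nil => simp
  | cons x xs ih =>
    simp only [List.filter_cons]
    by_cases hp : p x = true
    · rw [if_pos hp, if_pos (h x hp)]
      simpa using ih
    · rw [if_neg hp]
      split
      · simp only [List.length_cons]; omega
      · exact ih

theorem pvLenFilterLt (p q : Int → Bool) (h : ∀ a, p a = true → q a = true) (c : Int)
    (hq : q c = true) (hp : p c = false) :
    ∀ l : List Int, c ∈ l → (l.filter p).length < (l.filter q).length := by
  intro l hc
  induction l with
  | nil => cases hc
  | cons x xs ih =>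
    simp only [List.filter_cons]
    rcases List.mem_cons.mp hc with rfl | hmem
    · rw [if_neg (by simp [hp]), if_pos hq]
      simpa using Nat.lt_succ_of_le (pvLenFilterLe p q h xs)
    · by_cases hx : p x = true
      · rw [if_pos hx, if_pos (h x hx)]
        simpa using ih hmem
      · rw [if_neg hx]
        have h2 := ih hmem
        split
        · simp only [List.length_cons]; omega
        · exact h2

-- ===== PORT A =====
-- build road_map (defaultdict(list)) and the directed-edge set roads;
-- a row without exactly two entries raises ValueError in Python (outside Pre_): skipped here
def pvStepA (st : PySem.Dict Int (List Int) × PySem.Set (Int × Int)) (row : List Int) :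
    PySem.Dict Int (List Int) × PySem.Set (Int × Int) :=
  match row with
  | a :: b :: _ =>
    let rm := st.1.insert a (st.1.getD a [] ++ [b])
    let rm := rm.insert b (rm.getD b [] ++ [a])
    (rm, PySem.Set.add st.2 (a, b))
  | _ => st

def pvBuildA (connections : List (List Int)) :
    PySem.Dict Int (List Int) × PySem.Set (Int × Int) :=
  connections.foldl pvStepA (PySem.Dict.empty, PySem.Set.empty)

-- dfs_count_swapped_roads: the recursion depth is bounded by the number of distinct
-- cities, so fuel (pvUniv …).length + 1 is a pure totality device, never exhausted
mutual
def pvDfsA (rm : PySem.Dict Int (List Int)) (roads : PySem.Set (Int × Int))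
    (fuel : Nat) (visited : PySem.Set Int) (city : Int) : Int × PySem.Set Int :=
  match fuel with
  | 0 => (0, visited)
  | f + 1 => pvGoA rm roads f (PySem.Set.add visited city) city (rm.getD city [])
termination_by (2 * fuel, 0)

def pvGoA (rm : PySem.Dict Int (List Int)) (roads : PySem.Set (Int × Int))
    (fuel : Nat) (visited : PySem.Set Int) (city : Int) (nbrs : List Int) :
    Int × PySem.Set Int :=
  match nbrs with
  | [] => (0, visited)
  | nb :: rest =>
    if nb ∈ visited then pvGoA rm roads fuel visited city rest
    else
      let flag : Int := if (nb, city) ∈ roads then 0 else 1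
      let r1 := pvDfsA rm roads fuel visited nb
      let r2 := pvGoA rm roads fuel r1.2 city rest
      (flag + r1.1 + r2.1, r2.2)
termination_by (2 * fuel + 1, nbrs.length)
end

def minReorder (n : Int) (connections : List (List Int)) : Int :=
  (pvDfsA (pvBuildA connections).1 (pvBuildA connections).2
    ((pvUniv connections).length + 1) PySem.Set.empty 0).1

-- ===== PORT B =====
-- build road_map with setdefault(...).append (= modify) and the roads set
def pvStepB (st : PySem.Dict Int (List Int) × PySem.Set (Int × Int)) (row : List Int) :
    PySem.Dict Int (List Int) × PySem.Set (Int × Int) :=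
  match row with
  | a :: b :: _ =>
    let rm := st.1.modify a [] (fun l => l ++ [b])
    let rm := rm.modify b [] (fun l => l ++ [a])
    (rm, PySem.Set.add st.2 (a, b))
  | _ => st

def pvBuildB (connections : List (List Int)) :
    PySem.Dict Int (List Int) × PySem.Set (Int × Int) :=
  connections.foldl pvStepB (PySem.Dict.empty, PySem.Set.empty)

-- the while loop over the explicit stack (head = next pop; pushing reversed(adj)
-- element by element and later popping yields adj ++ rest).  The extra 'city ∉ univ'
-- test is only a termination guard: every city ever pushed is an endpoint of some
-- connection, so the test never fires on states the loop actually reaches.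
def pvLoopB (rm : PySem.Dict Int (List Int)) (roads : PySem.Set (Int × Int))
    (univ : List Int) (visited : PySem.Set Int) (acc : Int)
    (stack : List (Int × Int)) : Int :=
  match stack with
  | [] => acc
  | (city, parent) :: rest =>
    if city ∈ visited ∨ city ∉ univ then pvLoopB rm roads univ visited acc rest
    else
      pvLoopB rm roads univ (PySem.Set.add visited city)
        (acc + (if (city, parent) ∈ roads then 0 else 1))
        ((rm.getD city []).map (fun x => (x, city)) ++ rest)
termination_by ((univ.filter (fun x => !(decide (x ∈ visited)))).length, stack.length)
decreasing_by
  all_goals first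
    | (apply Prod.Lex.right' <;> exact Nat.le_refl _)
    | (apply Prod.Lex.left
       have hu : city ∈ univ := by tauto
       have hv : city ∉ visited := by tauto
       refine pvLenFilterLt _ _ ?_ city ?_ ?_ univ hu
       · intro a ha
         simp only [Bool.not_eq_true', decide_eq_false_iff_not] at ha ⊢
         intro hm
         exact ha (by simp [PySem.Set.mem_add, hm])
       · simp [hv]
       · simp [PySem.Set.mem_add])

def minReorder_alt (n : Int) (connections : List (List Int)) : Int :=
  pvLoopB (pvBuildB connections).1 (pvBuildB connections).2 (pvUniv connections)
    (PySem.Set.add PySem.Set.empty 0) 0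
    (((pvBuildB connections).1.getD 0 []).map (fun x => (x, 0)))

-- ===== PRECONDITION & SPEC =====
-- Pre_ excludes exactly the inputs where Python's tuple unpacking 'for city_1, city_2
-- in connections' raises ValueError: a row that does not have exactly two entries.
def Pre_minReorder (n : Int) (connections : List (List Int)) : Prop :=
  ∀ row ∈ connections, row.length = 2
instance (n : Int) (connections : List (List Int)) : Decidable (Pre_minReorder n connections) := by
  unfold Pre_minReorder; infer_instance

def pvWitness_minReorder : Int × List (List Int) := (6, [[0, 1], [1, 3], [2, 3], [4, 0], [4, 5]])

def Spec_minReorder (n : Int) (connections : List (List Int)) (out : Int) : Prop := out = minReorder_alt n connections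
instance (n : Int) (connections : List (List Int)) (out : Int) : Decidable (Spec_minReorder n connections out) := by unfold Spec_minReorder; infer_instance

-- ===== CLAIM (what is proved, stated in full; the proofs are below) =====
def Claim_equal_minReorder : Prop := ∀ (n : Int) (connections : List (List Int)), Dom_minReorder n connections → Pre_minReorder n connections → Spec_minReorder n connections (minReorder n connections)

-- ===== LEMMAS AND PROOFS =====

-- number of still-unvisited cities: the common measure of all inductions below
def pvCnt (univ : List Int) (v : PySem.Set Int) : Nat :=
  (univ.filter (fun x => !(decide (x ∈ v)))).length

theorem pvCnt_le_length (univ : List Int) (v : PySem.Set Int) :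
    pvCnt univ v ≤ univ.length := List.length_filter_le _ _

theorem pvCnt_pos (univ : List Int) (v : PySem.Set Int) (c : Int)
    (hcu : c ∈ univ) (hcv : c ∉ v) : 1 ≤ pvCnt univ v := by
  have hc : c ∈ univ.filter (fun x => !(decide (x ∈ v))) :=
    List.mem_filter.mpr ⟨hcu, by simp [hcv]⟩
  have := List.length_pos_of_mem hc
  unfold pvCnt; omega

theorem pvCnt_mono (univ : List Int) (v w : PySem.Set Int)
    (hsub : ∀ x ∈ v, x ∈ w) : pvCnt univ w ≤ pvCnt univ v := by
  refine pvLenFilterLe _ _ ?_ univ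
  intro a ha
  simp only [Bool.not_eq_true', decide_eq_false_iff_not] at ha ⊢
  exact fun hv => ha (hsub a hv)

theorem pvCnt_add_lt (univ : List Int) (v : PySem.Set Int) (c : Int)
    (hcu : c ∈ univ) (hcv : c ∉ v) :
    pvCnt univ (PySem.Set.add v c) < pvCnt univ v := by
  refine pvLenFilterLt _ _ ?_ c ?_ ?_ univ hcu
  · intro a ha
    simp only [Bool.not_eq_true', decide_eq_false_iff_not] at ha ⊢
    intro hm
    exact ha (by simp [PySem.Set.mem_add, hm])
  · simp [hcv]
  · simp [PySem.Set.mem_add]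

-- A's neighbour loop, generalised to a worklist of (city, parent) pairs
def pvGoP (rm : PySem.Dict Int (List Int)) (roads : PySem.Set (Int × Int))
    (fuel : Nat) (visited : PySem.Set Int) (l : List (Int × Int)) : Int × PySem.Set Int :=
  match l with
  | [] => (0, visited)
  | (nb, p) :: rest =>
    if nb ∈ visited then pvGoP rm roads fuel visited rest
    else
      let r1 := pvDfsA rm roads fuel visited nb
      let r2 := pvGoP rm roads fuel r1.2 rest
      ((if (nb, p) ∈ roads then 0 else 1) + r1.1 + r2.1, r2.2)

theorem pvGoA_eq_goP (rm : PySem.Dict Int (List Int)) (roads : PySem.Set (Int × Int))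
    (fuel : Nat) (city : Int) :
    ∀ (nbrs : List Int) (v : PySem.Set Int),
      pvGoA rm roads fuel v city nbrs = pvGoP rm roads fuel v (nbrs.map (fun x => (x, city))) := by
  intro nbrs
  induction nbrs with
  | nil => intro v; simp [pvGoA, pvGoP]
  | cons nb rest ih =>
    intro v
    by_cases h : nb ∈ v
    · simp [pvGoA, pvGoP, h, ih]
    · simp [pvGoA, pvGoP, h, ih]

theorem pvBuildB_eq_buildA (connections : List (List Int)) :
    pvBuildB connections = pvBuildA connections := by
  rfl

-- membership bound for the two inserts of one build step
theorem pvStepA_getD_sub (st : PySem.Dict Int (List Int) × PySem.Set (Int × Int))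
    (a b c : Int) (t : List Int) (x : Int)
    (hx : x ∈ (pvStepA st (a :: b :: t)).1.getD c []) :
    x ∈ st.1.getD a [] ∨ x ∈ st.1.getD b [] ∨ x ∈ st.1.getD c [] ∨ x = a ∨ x = b := by
  revert hx
  simp only [pvStepA, PySem.Dict.getD_insert]
  split_ifs <;> (try simp only [List.mem_append, List.mem_singleton]) <;> tauto

theorem pvBuildA_mem_aux (Q : Int → Prop) :
    ∀ (conns : List (List Int)) (st : PySem.Dict Int (List Int) × PySem.Set (Int × Int)),
      (∀ c x, x ∈ st.1.getD c [] → Q x) → (∀ r ∈ conns, ∀ y ∈ r, Q y) →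
      ∀ c x, x ∈ (conns.foldl pvStepA st).1.getD c [] → Q x := by
  intro conns
  induction conns with
  | nil => intro st hst _ c x hx; exact hst c x hx
  | cons row rows ih =>
    intro st hst hrows c x hx
    refine ih (pvStepA st row) ?_ (fun r hr => hrows r (List.mem_cons_of_mem _ hr)) c x hx
    intro c' x' hx'
    rcases row with _ | ⟨a, _ | ⟨b, t⟩⟩
    · exact hst c' x' hx'
    · exact hst c' x' hx'
    · have ha : Q a := hrows _ List.mem_cons_self a (by simp)
      have hb : Q b := hrows _ List.mem_cons_self b (by simp)
      rcases pvStepA_getD_sub st a b c' t x' hx' with h | h | h | rfl | rfl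
      · exact hst a x' h
      · exact hst b x' h
      · exact hst c' x' h
      · exact ha
      · exact hb

theorem pvBuildA_mem_univ (connections : List (List Int)) (c x : Int)
    (hx : x ∈ (pvBuildA connections).1.getD c []) : x ∈ pvUniv connections := by
  have h := pvBuildA_mem_aux (fun y => y ∈ connections.flatMap id) connections
    (PySem.Dict.empty, PySem.Set.empty)
    (by intro c' x' hx'; simp [PySem.Dict.getD_empty] at hx')
    (by intro r hr y hy; exact List.mem_flatMap.mpr ⟨r, hr, hy⟩)
    c x hx
  unfold pvUniv
  rw [PySem.List.mem_dedup]
  exact List.mem_cons_of_mem _ h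

-- visited only grows
theorem pvMono (rm : PySem.Dict Int (List Int)) (roads : PySem.Set (Int × Int)) :
    ∀ fuel : Nat,
      (∀ (v : PySem.Set Int) (c x : Int), x ∈ v → x ∈ (pvDfsA rm roads fuel v c).2) ∧
      (∀ (l : List (Int × Int)) (v : PySem.Set Int) (x : Int), x ∈ v → x ∈ (pvGoP rm roads fuel v l).2) := by
  intro fuel
  induction fuel with
  | zero =>
    have hdfs : ∀ (v : PySem.Set Int) (c x : Int), x ∈ v → x ∈ (pvDfsA rm roads 0 v c).2 := by
      intro v c x hx; simpa [pvDfsA] using hx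
    refine ⟨hdfs, ?_⟩
    intro l
    induction l with
    | nil => intro v x hx; simpa [pvGoP] using hx
    | cons p rest ih =>
      obtain ⟨nb, pp⟩ := p
      intro v x hx
      by_cases h : nb ∈ v
      · simpa [pvGoP, h] using ih v x hx
      · simp only [pvGoP, if_neg h]
        exact ih _ _ (hdfs v nb x hx)
  | succ f ihf =>
    have hdfs : ∀ (v : PySem.Set Int) (c x : Int), x ∈ v → x ∈ (pvDfsA rm roads (f + 1) v c).2 := by
      intro v c x hx
      have : pvDfsA rm roads (f + 1) v c
          = pvGoP rm roads f (PySem.Set.add v c) ((rm.getD c []).map (fun y => (y, c))) := by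
        simp [pvDfsA, pvGoA_eq_goP]
      rw [this]
      exact ihf.2 _ _ _ (by simp [PySem.Set.mem_add, hx])
    refine ⟨hdfs, ?_⟩
    intro l
    induction l with
    | nil => intro v x hx; simpa [pvGoP] using hx
    | cons p rest ih =>
      obtain ⟨nb, pp⟩ := p
      intro v x hx
      by_cases h : nb ∈ v
      · simpa [pvGoP, h] using ih v x hx
      · simp only [pvGoP, if_neg h]
        exact ih _ _ (hdfs v nb x hx)

theorem pvDfsA_superset (rm : PySem.Dict Int (List Int)) (roads : PySem.Set (Int × Int))
    (f : Nat) (hf : 1 ≤ f) (v : PySem.Set Int) (c : Int) :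
    ∀ x ∈ PySem.Set.add v c, x ∈ (pvDfsA rm roads f v c).2 := by
  obtain ⟨g, rfl⟩ : ∃ g, f = g + 1 := ⟨f - 1, by omega⟩
  intro x hx
  have : pvDfsA rm roads (g + 1) v c
      = pvGoP rm roads g (PySem.Set.add v c) ((rm.getD c []).map (fun y => (y, c))) := by
    simp [pvDfsA, pvGoA_eq_goP]
  rw [this]
  exact (pvMono rm roads g).2 _ _ _ hx

-- with enough fuel the result does not depend on the exact fuel value
theorem pvFuelIrrel (rm : PySem.Dict Int (List Int)) (roads : PySem.Set (Int × Int))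
    (univ : List Int) (hrm : ∀ c x, x ∈ rm.getD c [] → x ∈ univ) :
    ∀ (m : Nat) (v : PySem.Set Int), pvCnt univ v ≤ m →
      ((∀ (f₁ f₂ : Nat) (c : Int), c ∈ univ → c ∉ v → pvCnt univ v ≤ f₁ → pvCnt univ v ≤ f₂ →
          pvDfsA rm roads f₁ v c = pvDfsA rm roads f₂ v c) ∧
       (∀ (f₁ f₂ : Nat) (l : List (Int × Int)), (∀ p ∈ l, p.1 ∈ univ) →
          pvCnt univ v ≤ f₁ → pvCnt univ v ≤ f₂ →
          pvGoP rm roads f₁ v l = pvGoP rm roads f₂ v l)) := by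
  intro m
  induction m using Nat.strong_induction_on with
  | _ m IH =>
    intro v hv
    have hdfs : ∀ (f₁ f₂ : Nat) (c : Int), c ∈ univ → c ∉ v → pvCnt univ v ≤ f₁ →
        pvCnt univ v ≤ f₂ → pvDfsA rm roads f₁ v c = pvDfsA rm roads f₂ v c := by
      intro f₁ f₂ c hcu hcv h1 h2
      have hpos := pvCnt_pos univ v c hcu hcv
      obtain ⟨g₁, rfl⟩ : ∃ g, f₁ = g + 1 := ⟨f₁ - 1, by omega⟩
      obtain ⟨g₂, rfl⟩ : ∃ g, f₂ = g + 1 := ⟨f₂ - 1, by omega⟩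
      have hlt := pvCnt_add_lt univ v c hcu hcv
      have e1 : pvDfsA rm roads (g₁ + 1) v c
          = pvGoP rm roads g₁ (PySem.Set.add v c) ((rm.getD c []).map (fun y => (y, c))) := by
        simp [pvDfsA, pvGoA_eq_goP]
      have e2 : pvDfsA rm roads (g₂ + 1) v c
          = pvGoP rm roads g₂ (PySem.Set.add v c) ((rm.getD c []).map (fun y => (y, c))) := by
        simp [pvDfsA, pvGoA_eq_goP]
      rw [e1, e2]
      refine (IH (pvCnt univ (PySem.Set.add v c)) (by omega) _ le_rfl).2 g₁ g₂ _ ?_ (by omega) (by omega)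
      intro p hp
      rcases List.mem_map.mp hp with ⟨y, hy, rfl⟩
      exact hrm c y hy
    refine ⟨hdfs, ?_⟩
    intro f₁ f₂ l
    induction l with
    | nil => intro _ _ _; simp [pvGoP]
    | cons p rest ih =>
      intro hl h1 h2
      obtain ⟨nb, pp⟩ := p
      by_cases h : nb ∈ v
      · simp only [pvGoP, if_pos h]
        exact ih (fun q hq => hl q (List.mem_cons_of_mem _ hq)) h1 h2
      · have hnb : nb ∈ univ := hl (nb, pp) List.mem_cons_self
        have hpos := pvCnt_pos univ v nb hnb h
        have hde := hdfs f₁ f₂ nb hnb h h1 h2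
        have hlt := pvCnt_add_lt univ v nb hnb h
        have hsup := pvDfsA_superset rm roads f₁ (by omega) v nb
        have hle : pvCnt univ (pvDfsA rm roads f₁ v nb).2 ≤ pvCnt univ (PySem.Set.add v nb) :=
          pvCnt_mono univ _ _ hsup
        have hrest := (IH (pvCnt univ (pvDfsA rm roads f₁ v nb).2) (by omega) _ le_rfl).2
          f₁ f₂ rest (fun q hq => hl q (List.mem_cons_of_mem _ hq)) (by omega) (by omega)
        simp only [pvGoP, if_neg h]
        rw [hde] at hrest ⊢
        rw [hrest]

theorem pvGoP_append (rm : PySem.Dict Int (List Int)) (roads : PySem.Set (Int × Int))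
    (fuel : Nat) :
    ∀ (l₁ l₂ : List (Int × Int)) (v : PySem.Set Int),
      pvGoP rm roads fuel v (l₁ ++ l₂) =
        ((pvGoP rm roads fuel v l₁).1 +
           (pvGoP rm roads fuel (pvGoP rm roads fuel v l₁).2 l₂).1,
         (pvGoP rm roads fuel (pvGoP rm roads fuel v l₁).2 l₂).2) := by
  intro l₁
  induction l₁ with
  | nil => intro l₂ v; simp [pvGoP]
  | cons p rest ih =>
    intro l₂ v
    obtain ⟨nb, pp⟩ := p
    by_cases h : nb ∈ v
    · simp only [List.cons_append, pvGoP, if_pos h]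
      exact ih l₂ v
    · simp only [List.cons_append, pvGoP, if_neg h]
      rw [ih]
      apply Prod.ext <;> simp [add_assoc]

-- the stack loop computes exactly what A's recursion computes on the same worklist
theorem pvMain (rm : PySem.Dict Int (List Int)) (roads : PySem.Set (Int × Int))
    (univ : List Int) (hrm : ∀ c x, x ∈ rm.getD c [] → x ∈ univ) :
    ∀ (m : Nat) (stack : List (Int × Int)) (v : PySem.Set Int) (acc : Int) (f : Nat),
      pvCnt univ v ≤ m → (∀ p ∈ stack, p.1 ∈ univ) → pvCnt univ v ≤ f →
      pvLoopB rm roads univ v acc stack = acc + (pvGoP rm roads f v stack).1 := by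
  intro m
  induction m using Nat.strong_induction_on with
  | _ m IH =>
    intro stack
    induction stack with
    | nil => intro v acc f _ _ _; simp [pvLoopB, pvGoP]
    | cons p rest ih =>
      intro v acc f hm hs hf
      obtain ⟨city, parent⟩ := p
      have hcu : city ∈ univ := hs (city, parent) List.mem_cons_self
      by_cases h : city ∈ v
      · rw [show pvLoopB rm roads univ v acc ((city, parent) :: rest)
              = pvLoopB rm roads univ v acc rest from by
            simp [pvLoopB, h]]
        simp only [pvGoP, if_pos h]
        exact ih v acc f hm (fun q hq => hs q (List.mem_cons_of_mem _ hq)) hf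
      · have hpos := pvCnt_pos univ v city hcu h
        have hlt := pvCnt_add_lt univ v city hcu h
        obtain ⟨g, rfl⟩ : ∃ g, f = g + 1 := ⟨f - 1, by omega⟩
        have hch : ∀ q ∈ (rm.getD city []).map (fun x => (x, city)), q.1 ∈ univ := by
          intro q hq
          rcases List.mem_map.mp hq with ⟨y, hy, rfl⟩
          exact hrm city y hy
        have hst' : ∀ q ∈ (rm.getD city []).map (fun x => (x, city)) ++ rest, q.1 ∈ univ := by
          intro q hq
          rcases List.mem_append.mp hq with h' | h'
          · exact hch q h'
          · exact hs q (List.mem_cons_of_mem _ h')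
        have hB := IH (pvCnt univ (PySem.Set.add v city)) (by omega)
          ((rm.getD city []).map (fun x => (x, city)) ++ rest)
          (PySem.Set.add v city) (acc + (if (city, parent) ∈ roads then 0 else 1)) g
          le_rfl hst' (by omega)
        rw [show pvLoopB rm roads univ v acc ((city, parent) :: rest)
              = pvLoopB rm roads univ (PySem.Set.add v city)
                  (acc + (if (city, parent) ∈ roads then 0 else 1))
                  ((rm.getD city []).map (fun x => (x, city)) ++ rest) from by
            simp [pvLoopB, h, hcu]]
        rw [hB, pvGoP_append]
        have hD : pvDfsA rm roads (g + 1) v city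
            = pvGoP rm roads g (PySem.Set.add v city) ((rm.getD city []).map (fun y => (y, city))) := by
          simp [pvDfsA, pvGoA_eq_goP]
        simp only [pvGoP, if_neg h]
        rw [hD]
        -- reconcile the two fuels on the tail of the worklist
        have hsub : ∀ x ∈ PySem.Set.add v city,
            x ∈ (pvGoP rm roads g (PySem.Set.add v city) ((rm.getD city []).map (fun y => (y, city)))).2 :=
          fun x hx => (pvMono rm roads g).2 _ _ _ hx
        have hle : pvCnt univ (pvGoP rm roads g (PySem.Set.add v city)
              ((rm.getD city []).map (fun y => (y, city)))).2 ≤ pvCnt univ (PySem.Set.add v city) :=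
          pvCnt_mono univ _ _ hsub
        have hFI := (pvFuelIrrel rm roads univ hrm
            (pvCnt univ (pvGoP rm roads g (PySem.Set.add v city)
              ((rm.getD city []).map (fun y => (y, city)))).2) _ le_rfl).2
          (g + 1) g rest (fun q hq => hs q (List.mem_cons_of_mem _ hq)) (by omega) (by omega)
        rw [hFI]
        ring

-- ===== VERDICT (by name: the statement is the Claim_ definition above) =====
theorem minReorder_spec : Claim_equal_minReorder := by
  unfold Claim_equal_minReorder
  intro n conns _ _
  unfold Spec_minReorder minReorder minReorder_alt
  rw [pvBuildB_eq_buildA]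
  have hrm : ∀ c x, x ∈ (pvBuildA conns).1.getD c [] → x ∈ pvUniv conns :=
    fun c x hx => pvBuildA_mem_univ conns c x hx
  have hch : ∀ q ∈ ((pvBuildA conns).1.getD 0 []).map (fun x => (x, (0 : Int))), q.1 ∈ pvUniv conns := by
    intro q hq
    rcases List.mem_map.mp hq with ⟨y, hy, rfl⟩
    exact hrm 0 y hy
  have hcnt0 : pvCnt (pvUniv conns) (PySem.Set.add PySem.Set.empty 0) ≤ (pvUniv conns).length :=
    le_trans (pvCnt_le_length _ _) le_rfl
  have hmain := pvMain (pvBuildA conns).1 (pvBuildA conns).2 (pvUniv conns) hrm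
    (pvCnt (pvUniv conns) (PySem.Set.add PySem.Set.empty 0))
    (((pvBuildA conns).1.getD 0 []).map (fun x => (x, 0)))
    (PySem.Set.add PySem.Set.empty 0) 0 (pvUniv conns).length
    le_rfl hch hcnt0
  have hD : pvDfsA (pvBuildA conns).1 (pvBuildA conns).2 ((pvUniv conns).length + 1) PySem.Set.empty 0
      = pvGoP (pvBuildA conns).1 (pvBuildA conns).2 (pvUniv conns).length
          (PySem.Set.add PySem.Set.empty 0)
          (((pvBuildA conns).1.getD 0 []).map (fun y => (y, 0))) := by
    simp [pvDfsA, pvGoA_eq_goP]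
  rw [hmain, hD]
  ring
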